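-- pv_equiv track=rewrite | github.com/Askinkaty/Stanford_CS336 | cs336_basics/bpe.py | merge_key
-- ===== SOURCE A (Python) =====
-- def merge_key(left: int | bytes, right: int | bytes, k: tuple, new_id: int):
--     new_k = list(k)
--     i = 0
--     updated_indices = []
--
--     while i < len(new_k) - 1:
--         if new_k[i] == left and new_k[i + 1] == right:
--             new_k[i] = new_id
--             new_k = new_k[:i + 1] + new_k[i + 2:] # drop here the right element
--             updated_indices.append(i)
--         i += 1
--     return tuple(new_k), updated_indices
-- ===== SOURCE B (Python) =====
-- def merge_key(left, right, k, new_id):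
--     out = []
--     updated_indices = []
--     n = len(k)
--     j = 0
--     while j < n:
--         if j + 1 < n and k[j] == left and k[j + 1] == right:
--             updated_indices.append(len(out))
--             out.append(new_id)
--             j += 2
--         else:
--             out.append(k[j])
--             j += 1
--     return tuple(out), updated_indices
-- ===== Notes on version B (the rewrite author's own statement) =====
-- stated objective: alternative
-- what changed: Instead of repeatedly rewriting the working list in place and re-slicing it at every merge, B makes one forward pass over the input, appending either the merged new_id (advancing by 2) or the current element (advancing by 1) to a fresh output list, recording len(out) as the updated index.
import Mathlib
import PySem

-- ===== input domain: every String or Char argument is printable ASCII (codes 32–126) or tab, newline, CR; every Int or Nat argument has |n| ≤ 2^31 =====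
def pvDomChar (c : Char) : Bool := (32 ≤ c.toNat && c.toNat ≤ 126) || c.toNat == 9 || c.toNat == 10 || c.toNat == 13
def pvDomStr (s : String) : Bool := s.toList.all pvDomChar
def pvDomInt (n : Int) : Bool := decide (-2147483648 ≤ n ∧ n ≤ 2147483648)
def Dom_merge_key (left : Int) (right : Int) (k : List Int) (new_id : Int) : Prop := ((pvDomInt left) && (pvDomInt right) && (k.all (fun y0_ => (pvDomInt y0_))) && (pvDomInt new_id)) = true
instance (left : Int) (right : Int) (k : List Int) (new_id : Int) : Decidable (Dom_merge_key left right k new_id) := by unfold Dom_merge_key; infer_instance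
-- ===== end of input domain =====

-- B replaces A's rewrite-and-reslice loop with a single forward pass building a fresh output list (objective: alternative).
-- ===== PORT A =====
-- Python while-loop with state (new_k, i, updated_indices); the Nat fuel (initialised to len(k), an upper bound on the
-- iteration count) only makes the recursion structural: it never runs out before the loop guard fails, and the fuel-0
-- return value coincides with the guard-false return value. In-range indexing new_k[i] is ported as pyGetD (always in
-- range under the loop guard, so exact).
def merge_key_loop (left right new_id : Int) : Nat → List Int → Nat → List Int → List Int × List Int
  | 0, new_k, _, upd => (new_k, upd)
  | fuel + 1, new_k, i, upd =>
    if i < new_k.length - 1 then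
      if PySem.List.pyGetD new_k ((i : Nat) : Int) 0 = left ∧ PySem.List.pyGetD new_k ((i + 1 : Nat) : Int) 0 = right then
        let nk1 := PySem.List.pySetD new_k ((i : Nat) : Int) new_id
        let nk2 := PySem.List.slice nk1 none (some ((i + 1 : Nat) : Int)) ++ PySem.List.slice nk1 (some ((i + 2 : Nat) : Int)) none
        merge_key_loop left right new_id fuel nk2 (i + 1) (upd ++ [((i : Nat) : Int)])
      else
        merge_key_loop left right new_id fuel new_k (i + 1) upd
    else (new_k, upd)

def merge_key (left : Int) (right : Int) (k : List Int) (new_id : Int) : List Int × List Int :=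
  merge_key_loop left right new_id k.length k 0 []

-- ===== PORT B =====
-- Same fuel convention: fuel = len(k) bounds the iteration count, and the fuel-0 value equals the guard-false value.
def merge_key_alt_loop (left right new_id : Int) (k : List Int) (n : Nat) : Nat → Nat → List Int → List Int → List Int × List Int
  | 0, _, out, upd => (out, upd)
  | fuel + 1, j, out, upd =>
    if j < n then
      if j + 1 < n ∧ PySem.List.pyGetD k ((j : Nat) : Int) 0 = left ∧ PySem.List.pyGetD k ((j + 1 : Nat) : Int) 0 = right then
        merge_key_alt_loop left right new_id k n fuel (j + 2) (out ++ [new_id]) (upd ++ [(out.length : Int)])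
      else
        merge_key_alt_loop left right new_id k n fuel (j + 1) (out ++ [PySem.List.pyGetD k ((j : Nat) : Int) 0]) upd
    else (out, upd)

def merge_key_alt (left : Int) (right : Int) (k : List Int) (new_id : Int) : List Int × List Int :=
  merge_key_alt_loop left right new_id k k.length k.length 0 [] []

-- ===== PRECONDITION & SPEC =====
def Spec_merge_key (left : Int) (right : Int) (k : List Int) (new_id : Int) (out : List Int × List Int) : Prop := out = merge_key_alt left right k new_id
instance (left : Int) (right : Int) (k : List Int) (new_id : Int) (out : List Int × List Int) : Decidable (Spec_merge_key left right k new_id out) := by unfold Spec_merge_key; infer_instance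

-- ===== CLAIM (what is proved, stated in full; the proofs are below) =====
def Claim_equal_merge_key : Prop := ∀ (left : Int) (right : Int) (k : List Int) (new_id : Int), Dom_merge_key left right k new_id → Spec_merge_key left right k new_id (merge_key left right k new_id)

-- ===== LEMMAS AND PROOFS =====

lemma getD_append_len (P t : List Int) (x d : Int) : (P ++ x :: t).getD P.length d = x := by
  simp [List.getD_eq_getElem?_getD]

lemma loop_eq (left right new_id : Int) (k : List Int) :
    ∀ (m j : Nat) (P upd : List Int) (fA fB : Nat), k.length - j ≤ m → j ≤ k.length →
      k.length - j ≤ fA → k.length - j ≤ fB →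
      merge_key_loop left right new_id fA (P ++ k.drop j) P.length upd
        = merge_key_alt_loop left right new_id k k.length fB j P upd := by
  intro m
  induction m with
  | zero =>
    intro j P upd fA fB hm hj hfA hfB
    have hjl : j = k.length := by omega
    subst hjl
    cases fA with
    | zero =>
      cases fB with
      | zero => simp [merge_key_loop, merge_key_alt_loop]
      | succ fB =>
        simp only [merge_key_loop, merge_key_alt_loop, List.drop_length, List.append_nil]
        rw [if_neg (lt_irrefl k.length)]
    | succ fA =>
      simp only [merge_key_loop, List.drop_length, List.append_nil]
      rw [if_neg (show ¬ P.length < P.length - 1 by omega)]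
      cases fB with
      | zero => simp [merge_key_alt_loop]
      | succ fB =>
        simp only [merge_key_alt_loop]
        rw [if_neg (lt_irrefl k.length)]
  | succ m ih =>
    intro j P upd fA fB hm hj hfA hfB
    by_cases h2 : j + 1 < k.length
    · -- pair position exists: both loops test (k[j], k[j+1]); fuel ≥ 2 > 0 on both sides
      obtain ⟨fA', rfl⟩ : ∃ f, fA = f + 1 := ⟨fA - 1, by omega⟩
      obtain ⟨fB', rfl⟩ : ∃ f, fB = f + 1 := ⟨fB - 1, by omega⟩
      have hdrop : k.drop j = k[j] :: k[j + 1] :: k.drop (j + 2) := by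
        rw [List.drop_eq_getElem_cons (by omega), List.drop_eq_getElem_cons h2]
      have hA0 : (P ++ k.drop j).getD P.length 0 = k[j] := by
        rw [hdrop]; exact getD_append_len _ _ _ _
      have hA1 : (P ++ k.drop j).getD (P.length + 1) 0 = k[j + 1] := by
        have : P ++ k.drop j = (P ++ [k[j]]) ++ k[j + 1] :: k.drop (j + 2) := by
          rw [hdrop]; simp
        rw [this]
        have := getD_append_len (P ++ [k[j]]) (k.drop (j + 2)) (k[j + 1]) 0
        simpa using this
      simp only [merge_key_loop, merge_key_alt_loop]
      have hlen : (P ++ k.drop j).length = P.length + (k.length - j) := by simp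
      have hguardA : P.length < (P ++ k.drop j).length - 1 := by omega
      rw [if_pos hguardA, if_pos (by omega : j < k.length)]
      simp only [PySem.List.pyGetD_natCast, hA0, hA1]
      have hBcond : (j + 1 < k.length ∧ k.getD j 0 = left ∧ k.getD (j + 1) 0 = right)
          ↔ (k[j] = left ∧ k[j + 1] = right) := by
        constructor
        · rintro ⟨-, h3, h4⟩
          constructor
          · rw [← h3]; simp [List.getD_eq_getElem?_getD, List.getElem?_eq_getElem (by omega : j < k.length)]
          · rw [← h4]; simp [List.getD_eq_getElem?_getD, List.getElem?_eq_getElem h2]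
        · rintro ⟨h3, h4⟩
          refine ⟨h2, ?_, ?_⟩
          · rw [← h3]; simp [List.getD_eq_getElem?_getD, List.getElem?_eq_getElem (by omega : j < k.length)]
          · rw [← h4]; simp [List.getD_eq_getElem?_getD, List.getElem?_eq_getElem h2]
      by_cases hmatch : k[j] = left ∧ k[j + 1] = right
      · rw [if_pos hmatch, if_pos (hBcond.mpr hmatch)]
        have hset : PySem.List.pySetD (P ++ k.drop j) ((P.length : Nat) : Int) new_id
            = P ++ new_id :: k[j + 1] :: k.drop (j + 2) := by
          rw [PySem.List.pySetD_natCast, hdrop, List.set_append]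
          simp
          rw [List.drop_eq_getElem_cons (show j < k.length by omega), List.set_cons_zero]
        have hslice : PySem.List.slice (P ++ new_id :: k[j + 1] :: k.drop (j + 2)) none (some ((P.length + 1 : Nat) : Int))
              ++ PySem.List.slice (P ++ new_id :: k[j + 1] :: k.drop (j + 2)) (some ((P.length + 2 : Nat) : Int)) none
            = (P ++ [new_id]) ++ k.drop (j + 2) := by
          rw [PySem.List.slice_to_natCast, PySem.List.slice_from_natCast]
          rw [show P ++ new_id :: k[j + 1] :: k.drop (j + 2)
              = (P ++ [new_id, k[j + 1]]) ++ k.drop (j + 2) by simp]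
          rw [show P.length + 2 = (P ++ [new_id, k[j + 1]]).length by simp, List.drop_left]
          rw [List.take_append_of_le_length (by simp)]
          rw [show P ++ [new_id, k[j + 1]] = (P ++ [new_id]) ++ [k[j + 1]] by simp,
              List.take_append_of_le_length (by simp), List.take_of_length_le (by simp)]
        simp only [hset, hslice]
        rw [show P.length + 1 = (P ++ [new_id]).length by simp]
        exact ih (j + 2) (P ++ [new_id]) (upd ++ [(P.length : Int)]) fA' fB'
          (by omega) (by omega) (by omega) (by omega)
      · rw [if_neg hmatch, if_neg (fun hc => hmatch (hBcond.mp hc))]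
        have hre : P ++ k.drop j = (P ++ [k[j]]) ++ k.drop (j + 1) := by
          rw [hdrop, List.drop_eq_getElem_cons h2]
          simp only [List.append_assoc, List.cons_append, List.nil_append]
        rw [hre, show P.length + 1 = (P ++ [k[j]]).length by simp]
        have hkj : k.getD j 0 = k[j] := by
          simp [List.getD_eq_getElem?_getD, List.getElem?_eq_getElem (by omega : j < k.length)]
        rw [hkj]
        exact ih (j + 1) (P ++ [k[j]]) upd fA' fB' (by omega) (by omega) (by omega) (by omega)
    · by_cases h1 : j < k.length
      · -- last element: A's guard is already false, B copies k[j] and then stops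
        obtain ⟨fA', rfl⟩ : ∃ f, fA = f + 1 := ⟨fA - 1, by omega⟩
        obtain ⟨fB', rfl⟩ : ∃ f, fB = f + 1 := ⟨fB - 1, by omega⟩
        have hlen : (P ++ k.drop j).length = P.length + (k.length - j) := by simp
        have hdrop : k.drop j = [k[j]] := by
          rw [List.drop_eq_getElem_cons h1]
          simp [List.drop_eq_nil_of_le (by omega : k.length ≤ j + 1)]
        have hkj : k.getD j 0 = k[j] := by
          simp [List.getD_eq_getElem?_getD, List.getElem?_eq_getElem h1]
        simp only [merge_key_loop, merge_key_alt_loop, PySem.List.pyGetD_natCast]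
        rw [if_neg (show ¬ P.length < (P ++ k.drop j).length - 1 by omega), if_pos h1,
            if_neg (show ¬ (j + 1 < k.length ∧ k.getD j 0 = left ∧ k.getD (j + 1) 0 = right)
              from fun hc => h2 hc.1)]
        rw [hdrop, hkj]
        cases fB' with
        | zero => simp [merge_key_alt_loop]
        | succ fB'' =>
          simp only [merge_key_alt_loop]
          rw [if_neg (show ¬ j + 1 < k.length from h2)]
      · have hjl : j = k.length := by omega
        subst hjl
        cases fA with
        | zero =>
          cases fB with
          | zero => simp [merge_key_loop, merge_key_alt_loop]
          | succ fB =>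
            simp only [merge_key_loop, merge_key_alt_loop, List.drop_length, List.append_nil]
            rw [if_neg (lt_irrefl k.length)]
        | succ fA =>
          simp only [merge_key_loop, List.drop_length, List.append_nil]
          rw [if_neg (show ¬ P.length < P.length - 1 by omega)]
          cases fB with
          | zero => simp [merge_key_alt_loop]
          | succ fB =>
            simp only [merge_key_alt_loop]
            rw [if_neg (lt_irrefl k.length)]

-- ===== VERDICT (by name: the statement is the Claim_ definition above) =====
theorem merge_key_spec : Claim_equal_merge_key := by
  intro left right k new_id _
  unfold Spec_merge_key merge_key merge_key_alt
  have := loop_eq left right new_id k k.length 0 [] [] k.length k.length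
    (by omega) (by omega) (by omega) (by omega)
  simpa using this
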